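-- pv_equiv track=rewrite | github.com/chaiminwoo0223/Programmers | Level/level2/program33.py | solution
-- ===== SOURCE A (Python) =====
-- def solution(order):
--     result = 0
--     container = []
--     idx = 0
--
--     for box in range(len(order)):
--         container.append(box + 1)
--
--         while container and container[-1] == order[idx]:
--             container.pop()
--             result += 1
--             idx += 1
--
--     return result
-- ===== SOURCE B (Python) =====
-- def solution(order):
--     # Iterate over wanted boxes, lazily pushing boxes onto the stack.
--     n = len(order)
--     stack = []
--     next_box = 1
--     result = 0
--     for want in order:
--         while (not stack or stack[-1] != want) and next_box <= n:
--             stack.append(next_box)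
--             next_box += 1
--         if stack and stack[-1] == want:
--             stack.pop()
--             result += 1
--         else:
--             break
--     return result
-- ===== Notes on version B (the rewrite author's own statement) =====
-- stated objective: alternative
-- what changed: B inverts the loop structure: instead of iterating over box numbers and popping all matching wants after each push (A), B iterates over the wanted sequence and lazily pushes boxes until the top matches or boxes run out, breaking early when a want cannot be served.
import Mathlib
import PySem

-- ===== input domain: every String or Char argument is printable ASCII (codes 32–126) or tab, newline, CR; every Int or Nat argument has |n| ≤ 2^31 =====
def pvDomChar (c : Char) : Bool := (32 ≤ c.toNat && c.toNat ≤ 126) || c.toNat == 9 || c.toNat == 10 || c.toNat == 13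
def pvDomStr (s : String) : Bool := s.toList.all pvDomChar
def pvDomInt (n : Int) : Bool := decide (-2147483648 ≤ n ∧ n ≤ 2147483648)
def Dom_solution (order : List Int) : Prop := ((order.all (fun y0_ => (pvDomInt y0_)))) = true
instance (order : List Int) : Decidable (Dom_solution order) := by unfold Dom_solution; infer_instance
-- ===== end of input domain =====

-- B iterates over the wanted sequence with lazy pushing instead of A's loop over box
-- numbers with eager popping; same O(n) cost, a different loop decomposition.

-- ===== PORT A =====
-- inner `while container and container[-1] == order[idx]`; stack top at the head.
-- idx is a nonnegative counter, so order[idx] is order[idx]? (PySem.List.pyGet?_natCast).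
def popA (order : List Int) : List Int → Nat → Int → List Int × Nat × Int
  | [], idx, r => ([], idx, r)
  | t :: rest, idx, r =>
      if order[idx]? = some t then popA order rest (idx + 1) (r + 1)
      else (t :: rest, idx, r)

-- `for box in range(len(order))`: rem counts remaining iterations, nb = box + 1.
def loopA (order : List Int) : Nat → List Int → Nat → Nat → Int → Int
  | 0, _, _, _, r => r
  | rem + 1, container, nb, idx, r =>
      match popA order ((nb : Int) :: container) idx r with
      | (c', idx', r') => loopA order rem c' (nb + 1) idx' r'

def solution (order : List Int) : Int := loopA order order.length [] 1 0 0

-- ===== PORT B =====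
-- inner `while (not stack or stack[-1] != want) and next_box <= n: push`
def pushB (n : Nat) (want : Int) (stack : List Int) (nb : Nat) : List Int × Nat :=
  if h : stack.head? ≠ some want ∧ nb ≤ n then pushB n want ((nb : Int) :: stack) (nb + 1)
  else (stack, nb)
termination_by n + 1 - nb
decreasing_by omega

-- `for want in order`, with break when the top still does not match.
def loopB (n : Nat) : List Int → List Int → Nat → Int → Int
  | [], _, _, r => r
  | want :: rest, stack, nb, r =>
      match pushB n want stack nb with
      | (stack', nb') =>
        match stack' with
        | t :: s' => if t = want then loopB n rest s' nb' (r + 1) else r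
        | [] => r

def solution_alt (order : List Int) : Int := loopB order.length order [] 1 0

-- ===== PRECONDITION & SPEC =====
def Spec_solution (order : List Int) (out : Int) : Prop := out = solution_alt order
instance (order : List Int) (out : Int) : Decidable (Spec_solution order out) := by unfold Spec_solution; infer_instance

-- ===== CLAIM (what is proved, stated in full; the proofs are below) =====
def Claim_equal_solution : Prop := ∀ (order : List Int), Dom_solution order → Spec_solution order (solution order)

-- ===== LEMMAS AND PROOFS =====

-- Common reference process: at state (stack, nb, idx), pop if the top matches order[idx],
-- else push the next box if any remain, else stop; returns the number of pops.
def core (order : List Int) : List Int → Nat → Nat → Int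
  | t :: rest, nb, idx =>
      if order[idx]? = some t then 1 + core order rest nb (idx + 1)
      else if _h : nb ≤ order.length then core order ((nb : Int) :: t :: rest) (nb + 1) idx
      else 0
  | [], nb, idx =>
      if _h : nb ≤ order.length then core order [(nb : Int)] (nb + 1) idx
      else 0
termination_by stack nb idx => 2 * (order.length - idx) + stack.length + 3 * (order.length + 1 - nb)
decreasing_by
  · rename_i h
    have : idx < order.length := (List.getElem?_eq_some_iff.mp h).1
    simp; omega
  · simp; omega
  · simp; omega

-- a stack is "normal" at idx if the top does not match order[idx]
def normA (order : List Int) (stack : List Int) (idx : Nat) : Prop :=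
  ∀ t, stack.head? = some t → order[idx]? ≠ some t

theorem popA_normal (order : List Int) (stack : List Int) (idx : Nat) (r : Int) :
    normA order (popA order stack idx r).1 (popA order stack idx r).2.1 := by
  induction stack generalizing idx r with
  | nil => intro t ht; simp [popA] at ht
  | cons t rest ih =>
    by_cases h : order[idx]? = some t
    · simpa [popA, h] using ih (idx + 1) (r + 1)
    · intro u hu hgu
      simp [popA, h] at hu hgu
      exact h (hu ▸ hgu)

theorem popA_core (order : List Int) (stack : List Int) (nb idx : Nat) (r : Int) :
    core order stack nb idx
      = (popA order stack idx r).2.2 - r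
        + core order (popA order stack idx r).1 nb (popA order stack idx r).2.1 := by
  induction stack generalizing idx r with
  | nil => simp [popA]
  | cons t rest ih =>
    by_cases h : order[idx]? = some t
    · rw [show core order (t :: rest) nb idx = 1 + core order rest nb (idx + 1) by
        rw [core]; simp [h]]
      rw [ih (idx + 1) (r + 1)]
      simp [popA, h]; ring
    · simp [popA, h]

theorem core_stop (order : List Int) (stack : List Int) (nb idx : Nat)
    (h : order.length ≤ idx) : core order stack nb idx = 0 := by
  fun_induction core order stack nb idx with
  | case1 t rest nb idx hm ih =>
    exact absurd ((List.getElem?_eq_some_iff.mp hm).1) (by omega)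
  | case2 t rest nb idx hm hle ih => exact ih h
  | case3 t rest nb idx hm hle => rfl
  | case4 nb idx hle ih => exact ih h
  | case5 nb idx hle => rfl

theorem core_over (order : List Int) (stack : List Int) (nb idx : Nat)
    (hn : normA order stack idx) (hnb : order.length < nb) :
    core order stack nb idx = 0 := by
  cases stack with
  | nil => rw [core]; simp; omega
  | cons t rest =>
    rw [core]
    have : ¬ order[idx]? = some t := hn t rfl
    simp [this]; omega

theorem A_main (order : List Int) (rem : Nat) :
    ∀ (c : List Int) (nb idx : Nat) (r : Int), nb + rem = order.length + 1 →
      normA order c idx → loopA order rem c nb idx r = r + core order c nb idx := by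
  induction rem with
  | zero =>
    intro c nb idx r hsum hn
    rw [loopA, core_over order c nb idx hn (by omega)]; ring
  | succ rem ih =>
    intro c nb idx r hsum hn
    have hstep : core order c nb idx = core order ((nb : Int) :: c) (nb + 1) idx := by
      cases c with
      | nil =>
        have hle : nb ≤ order.length := by omega
        conv_lhs => rw [core]
        simp [hle]
      | cons t rest =>
        have hle : nb ≤ order.length := by omega
        have hnm : ¬ order[idx]? = some t := hn t rfl
        conv_lhs => rw [core]
        simp [hnm, hle]
    rw [loopA]
    rcases hp : popA order ((nb : Int) :: c) idx r with ⟨c', idx', r'⟩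
    have hnorm := popA_normal order ((nb : Int) :: c) idx r
    rw [hp] at hnorm
    have hcore := popA_core order ((nb : Int) :: c) (nb + 1) idx r
    rw [hp] at hcore
    simp only at hnorm hcore ⊢
    rw [ih c' (nb + 1) idx' r' (by omega) hnorm, hstep, hcore]
    ring

theorem B_main (order : List Int) (stack : List Int) (nb idx : Nat) :
    ∀ r : Int, loopB order.length (order.drop idx) stack nb r = r + core order stack nb idx := by
  fun_induction core order stack nb idx with
  | case1 t rest nb idx hm ih =>
    intro r
    have hidx : idx < order.length := (List.getElem?_eq_some_iff.mp hm).1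
    have hdrop : order.drop idx = t :: order.drop (idx + 1) := by
      rw [List.drop_eq_getElem_cons hidx]
      simp [(List.getElem?_eq_some_iff.mp hm).2]
    rw [hdrop, loopB]
    rw [show pushB order.length t (t :: rest) nb = (t :: rest, nb) by
      rw [pushB]; simp]
    simp only [↓reduceIte, ih (r + 1)]
    ring
  | case2 t rest nb idx hm hle ih =>
    intro r
    rcases hd : order.drop idx with _ | ⟨want, ws⟩
    · have h0 : order.length ≤ idx := List.drop_eq_nil_iff.mp hd
      rw [loopB, core_stop order _ (nb + 1) idx h0]
      ring
    · have hw : order[idx]? = some want := by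
        have h0 := congrArg (fun l => l[0]?) hd
        simpa [List.getElem?_drop] using h0
      have hne : t ≠ want := fun he => hm (he ▸ hw)
      rw [loopB]
      rw [show pushB order.length want (t :: rest) nb
            = pushB order.length want ((nb : Int) :: t :: rest) (nb + 1) by
        rw [pushB]; simp [hne, hle]]
      have hih := ih r
      rw [hd, loopB] at hih
      exact hih
  | case3 t rest nb idx hm hle =>
    intro r
    rcases hd : order.drop idx with _ | ⟨want, ws⟩
    · rw [loopB]; ring
    · have hw : order[idx]? = some want := by
        have h0 := congrArg (fun l => l[0]?) hd
        simpa [List.getElem?_drop] using h0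
      have hne : t ≠ want := fun he => hm (he ▸ hw)
      rw [loopB]
      rw [show pushB order.length want (t :: rest) nb = (t :: rest, nb) by
        rw [pushB]; simp; omega]
      simp only [if_neg hne]
      ring
  | case4 nb idx hle ih =>
    intro r
    rcases hd : order.drop idx with _ | ⟨want, ws⟩
    · have h0 : order.length ≤ idx := List.drop_eq_nil_iff.mp hd
      rw [loopB, core_stop order _ (nb + 1) idx h0]
      ring
    · rw [loopB]
      rw [show pushB order.length want [] nb
            = pushB order.length want [(nb : Int)] (nb + 1) by
        rw [pushB]; simp [hle]]
      have hih := ih r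
      rw [hd, loopB] at hih
      exact hih
  | case5 nb idx hle =>
    intro r
    rcases hd : order.drop idx with _ | ⟨want, ws⟩
    · rw [loopB]; ring
    · rw [loopB]
      rw [show pushB order.length want [] nb = ([], nb) by
        rw [pushB]; simp; omega]
      ring

-- ===== VERDICT (by name: the statement is the Claim_ definition above) =====
theorem solution_spec : Claim_equal_solution := by
  intro order _
  unfold Spec_solution solution solution_alt
  rw [A_main order order.length [] 1 0 0 (by omega) (by intro t ht; simp at ht)]
  have := B_main order [] 1 0 0
  simpa using this.symm
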